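-- pv_equiv track=rewrite | github.com/Ethycs/structure_net | src/neural_architecture_lab/metrics_integration.py | _classify_architecture
-- ===== SOURCE A (Python) =====
-- from typing import Dict, Any, List, Optional, Tuple
--
-- def _classify_architecture(architecture: List[int]) -> str:
--     """Classify architecture type."""
--     if not architecture or len(architecture) < 3:
--         return "unknown"
--
--     depth = len(architecture) - 1
--
--     # Check patterns
--     if depth <= 3:
--         return "shallow"
--     elif depth >= 6:
--         return "deep"
--
--     # Check shape
--     sizes = architecture[1:-1]  # Hidden layers only
--     if all(sizes[i] >= sizes[i+1] for i in range(len(sizes)-1)):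
--         return "pyramid"
--     elif all(sizes[i] <= sizes[i+1] for i in range(len(sizes)-1)):
--         return "inverse_pyramid"
--     else:
--         # Check for bottleneck
--         min_idx = sizes.index(min(sizes))
--         if min_idx > 0 and min_idx < len(sizes) - 1:
--             return "bottleneck"
--         return "irregular"
-- ===== SOURCE B (Python) =====
-- from typing import List
--
-- def _classify_architecture(architecture: List[int]) -> str:
--     """Classify architecture type: one fused pass over the hidden layers
--     gathers ascent/descent flags and the first-minimum position, then a
--     single table lookup at the end picks the label."""
--     n = len(architecture)
--     if n < 3:
--         return "unknown"
--     if n <= 4: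
--         return "shallow"
--     if n >= 7:
--         return "deep"
--     # single left-to-right pass over hidden layers architecture[1:-1]
--     prev = architecture[1]
--     asc = desc = False
--     min_val, min_idx = prev, 0
--     i = 1
--     for v in architecture[2:-1]:
--         if v > prev:
--             asc = True
--         elif v < prev:
--             desc = True
--         if v < min_val:
--             min_val, min_idx = v, i
--         prev = v
--         i += 1
--     if not asc:
--         return "pyramid"
--     if not desc:
--         return "inverse_pyramid"
--     return "bottleneck" if 0 < min_idx < i - 1 else "irregular"
-- ===== Notes on version B (the rewrite author's own statement) =====
-- stated objective: alternative
-- what changed: B replaces A's four separate scans of the hidden slice (two adjacent-pair all() generators, min(), .index()) by ONE fused left-to-right pass with an accumulator (prev value, ascent/descent flags, running first-minimum value and position), classifying from the accumulated statistics at the end; the leading guards become plain arithmetic on len.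
import Mathlib
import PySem

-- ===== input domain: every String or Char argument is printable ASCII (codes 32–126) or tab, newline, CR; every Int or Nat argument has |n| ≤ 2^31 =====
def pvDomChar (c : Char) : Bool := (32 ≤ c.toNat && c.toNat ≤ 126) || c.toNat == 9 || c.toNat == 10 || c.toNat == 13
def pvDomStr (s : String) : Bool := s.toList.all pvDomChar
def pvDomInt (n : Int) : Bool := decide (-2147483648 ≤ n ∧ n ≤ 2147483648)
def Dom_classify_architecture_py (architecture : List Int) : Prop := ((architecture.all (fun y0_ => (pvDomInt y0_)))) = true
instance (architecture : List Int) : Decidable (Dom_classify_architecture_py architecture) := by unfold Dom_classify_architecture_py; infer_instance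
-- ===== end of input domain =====

-- B fuses A's four scans of the hidden slice into one accumulator pass (ascent/descent flags +
-- first-minimum position), classifying from the gathered statistics; same values, no speed claim.


-- ===== PORT A =====
def classify_architecture_py (architecture : List Int) : String :=
  -- if not architecture or len(architecture) < 3: return "unknown"
  if architecture = [] ∨ architecture.length < 3 then "unknown"
  else
    let depth : Int := (architecture.length : Int) - 1
    if depth ≤ 3 then "shallow"
    else if depth ≥ 6 then "deep"
    else
      -- sizes = architecture[1:-1]
      let sizes := PySem.List.slice architecture (some 1) (some (-1))
      -- all(sizes[i] >= sizes[i+1] for i in range(len(sizes)-1)); indices are in range, pyGetD is exact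
      if (List.range (sizes.length - 1)).all
          (fun i => decide (PySem.List.pyGetD sizes (i : Int) 0 ≥ PySem.List.pyGetD sizes ((i : Int) + 1) 0)) then
        "pyramid"
      else if (List.range (sizes.length - 1)).all
          (fun i => decide (PySem.List.pyGetD sizes (i : Int) 0 ≤ PySem.List.pyGetD sizes ((i : Int) + 1) 0)) then
        "inverse_pyramid"
      else
        -- min_idx = sizes.index(min(sizes)); here sizes is nonempty, so the none cases are unreachable
        match PySem.List.min? sizes (fun x => x) with
        | none => "irregular"
        | some m =>
          match PySem.List.index? sizes m with
          | none => "irregular"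
          | some min_idx =>
            if 0 < min_idx ∧ (min_idx : Int) < (sizes.length : Int) - 1 then "bottleneck" else "irregular"

-- ===== PORT B =====
-- one fused fold over architecture[2:-1] with state (prev, asc, desc, min_val, min_idx, i)
def classify_architecture_py_alt (architecture : List Int) : String :=
  let n := architecture.length
  if n < 3 then "unknown"
  else if n ≤ 4 then "shallow"
  else if n ≥ 7 then "deep"
  else
    let prev0 := PySem.List.pyGetD architecture 1 0   -- architecture[1]; index in range here
    let st := (PySem.List.slice architecture (some 2) (some (-1))).foldl
      (fun (s : Int × Bool × Bool × Int × Int × Int) v =>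
        let prev := s.1
        let asc := s.2.1
        let desc := s.2.2.1
        let min_val := s.2.2.2.1
        let min_idx := s.2.2.2.2.1
        let i := s.2.2.2.2.2
        let asc' := if v > prev then true else asc
        let desc' := if v > prev then desc else if v < prev then true else desc
        let mv := if v < min_val then v else min_val
        let mi := if v < min_val then i else min_idx
        (v, asc', desc', mv, mi, i + 1))
      (prev0, false, false, prev0, (0 : Int), (1 : Int))
    if st.2.1 = false then "pyramid"
    else if st.2.2.1 = false then "inverse_pyramid"
    else if 0 < st.2.2.2.2.1 ∧ st.2.2.2.2.1 < st.2.2.2.2.2 - 1 then "bottleneck" else "irregular"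

-- ===== PRECONDITION & SPEC =====
def Spec_classify_architecture_py (architecture : List Int) (out : String) : Prop := out = classify_architecture_py_alt architecture
instance (architecture : List Int) (out : String) : Decidable (Spec_classify_architecture_py architecture out) := by unfold Spec_classify_architecture_py; infer_instance

-- ===== CLAIM =====
def Claim_equal_classify_architecture_py : Prop := ∀ (architecture : List Int), Dom_classify_architecture_py architecture → Spec_classify_architecture_py architecture (classify_architecture_py architecture)

-- ===== LEMMAS AND PROOFS =====

set_option maxHeartbeats 4000000 in
set_option maxRecDepth 8192 in
lemma pv_len5 (a b c d e : Int) :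
    classify_architecture_py [a,b,c,d,e] = classify_architecture_py_alt [a,b,c,d,e] := by
  simp [classify_architecture_py, classify_architecture_py_alt, PySem.List.slice,
        PySem.List.clampIdx, PySem.List.min?, PySem.List.index?, List.range, List.range.loop,
        List.idxOf?, List.findIdx?, PySem.List.pyGetD, PySem.List.pyGet?, PySem.List.pyIdx?]
  repeat' (first | split_ifs | simp [List.findIdx?.go])
  all_goals try (first | rfl | omega)

set_option maxHeartbeats 4000000 in
set_option maxRecDepth 8192 in
lemma pv_len6 (a b c d e f : Int) :
    classify_architecture_py [a,b,c,d,e,f] = classify_architecture_py_alt [a,b,c,d,e,f] := by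
  simp [classify_architecture_py, classify_architecture_py_alt, PySem.List.slice,
        PySem.List.clampIdx, PySem.List.min?, PySem.List.index?, List.range, List.range.loop,
        List.idxOf?, List.findIdx?, PySem.List.pyGetD, PySem.List.pyGet?, PySem.List.pyIdx?]
  repeat' (first | split_ifs | simp [List.findIdx?.go])
  all_goals try (first | rfl | omega)

-- ===== VERDICT =====
theorem classify_architecture_py_spec : Claim_equal_classify_architecture_py := by
  intro architecture _
  unfold Spec_classify_architecture_py
  match architecture with
  | [] => rfl
  | [_] => rfl
  | [_, _] => rfl
  | [_, _, _] => rfl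
  | [_, _, _, _] => rfl
  | [a, b, c, d, e] => exact pv_len5 a b c d e
  | [a, b, c, d, e, f] => exact pv_len6 a b c d e f
  | _ :: _ :: _ :: _ :: _ :: _ :: _ :: rest =>
    simp [classify_architecture_py, classify_architecture_py_alt]
    split_ifs <;> first | rfl | omega
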